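-- pv_equiv track=rewrite | github.com/deekshitakacham/6.009-Lab-6 | lab.py | group_combinations
-- ===== SOURCE A (Python) =====
-- def group_combinations(students, group):
--     """
--     Given students, which is a dictionary of the students, and
--     the size of their group, returns the combinations of
--     the students of that group size
--     """
--
--     if group == 1:
--         result1 = []
--         for student in students:
--             result1.append([student])
--         return result1
--
--     else:
--         result2 = []
--         for i in range(len(students)):
--             smaller_list = students[i+1:]
--             for left_over in group_combinations(smaller_list, group-1):
--                 result2.append([students[i]]+left_over)
--
--         return result2
-- ===== SOURCE B (Python) =====
-- def group_combinations(students, group):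
--     # Iterative level-by-level build: level k holds every k-combination
--     # (with the index after its last chosen element), no recursion, no slicing.
--     if group < 1 or group > len(students):
--         return []
--     level = [([], 0)]
--     for _ in range(group):
--         nxt = []
--         for combo, start in level:
--             for j in range(start, len(students)):
--                 nxt.append((combo + [students[j]], j + 1))
--         level = nxt
--     return [combo for combo, _ in level]
-- ===== Notes on version B (the rewrite author's own statement) =====
-- stated objective: alternative
-- what changed: Replaces A's recursive index-loop with slicing by an iterative level-by-level build: an accumulator of (partial combo, next start index) pairs is expanded once per group level, with no recursion and no list slicing.
import Mathlib
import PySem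

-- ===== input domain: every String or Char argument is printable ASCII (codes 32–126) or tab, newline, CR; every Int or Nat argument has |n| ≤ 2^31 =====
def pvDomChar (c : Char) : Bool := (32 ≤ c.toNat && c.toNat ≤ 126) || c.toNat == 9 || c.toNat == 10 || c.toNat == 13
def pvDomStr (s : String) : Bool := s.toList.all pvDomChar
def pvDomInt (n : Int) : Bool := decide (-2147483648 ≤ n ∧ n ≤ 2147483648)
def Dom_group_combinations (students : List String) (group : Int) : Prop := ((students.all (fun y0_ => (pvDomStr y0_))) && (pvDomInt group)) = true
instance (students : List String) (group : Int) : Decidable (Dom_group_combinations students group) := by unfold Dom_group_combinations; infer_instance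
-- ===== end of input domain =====

-- B replaces A's recursion with an iterative level-by-level build (no recursion, no slicing): alternative decomposition, same output order.

-- ===== PORT A =====
-- A's else-branch loop 'for i in range(len(students)): smaller = students[i+1:] …' is the
-- structural recursion gcA_loop over the suffixes of students: at each step the head plays
-- students[i] and the tail plays students[i+1:].
mutual
def group_combinations (students : List String) (group : Int) : List (List String) :=
  if group = 1 then students.map (fun student => [student])
  else gcA_loop students group
termination_by (students.length, 1)

def gcA_loop (students : List String) (group : Int) : List (List String) :=
  match students with
  | [] => []
  | s :: rest =>
      (group_combinations rest (group - 1)).map (fun left_over => s :: left_over)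
        ++ gcA_loop rest group
termination_by (students.length, 0)
end

-- ===== PORT B =====
-- 'for _ in range(group)' is a foldl over List.range group.toNat (1 ≤ group ≤ len here);
-- the two inner loops are foldl with the nxt accumulator and a map over
-- range(start, len(students)); students[j] with j < len is exact as getD.
def group_combinations_alt (students : List String) (group : Int) : List (List String) :=
  if group < 1 ∨ (students.length : Int) < group then []
  else
    let level := (List.range group.toNat).foldl
      (fun level _ =>
        level.foldl
          (fun nxt p =>
            nxt ++ (List.range' p.2 (students.length - p.2)).map
              (fun j => (p.1 ++ [students.getD j ""], j + 1)))
          [])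
      [(([] : List String), (0 : Nat))]
    level.map (fun p => p.1)

-- ===== PRECONDITION & SPEC =====
def Spec_group_combinations (students : List String) (group : Int) (out : List (List String)) : Prop := out = group_combinations_alt students group
instance (students : List String) (group : Int) (out : List (List String)) : Decidable (Spec_group_combinations students group out) := by unfold Spec_group_combinations; infer_instance

-- ===== CLAIM (what is proved, stated in full; the proofs are below) =====
def Claim_equal_group_combinations : Prop := ∀ (students : List String) (group : Int), Dom_group_combinations students group → Spec_group_combinations students group (group_combinations students group)

-- ===== LEMMAS AND PROOFS =====

-- the one-level expansion of B, named for the proofs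
def gcB_expand (students : List String) (p : List String × Nat) : List (List String × Nat) :=
  (List.range' p.2 (students.length - p.2)).map (fun j => (p.1 ++ [students.getD j ""], j + 1))

def gcB_step (students : List String) (level : List (List String × Nat)) : List (List String × Nat) :=
  level.foldl (fun nxt p => nxt ++ gcB_expand students p) []

theorem gcB_step_eq_flatMap (students : List String) (level : List (List String × Nat)) :
    gcB_step students level = level.flatMap (gcB_expand students) := by
  unfold gcB_step
  have h : ∀ (l : List (List String × Nat)) (acc : List (List String × Nat)),
      l.foldl (fun nxt p => nxt ++ gcB_expand students p) acc = acc ++ l.flatMap (gcB_expand students) := by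
    intro l
    induction l with
    | nil => intro acc; simp
    | cons x xs ih => intro acc; simp [ih, List.flatMap_cons]
  simpa using h level []

theorem foldl_const_range {α : Type} (f : α → α) :
    ∀ (k : Nat) (init : α), (List.range k).foldl (fun a _ => f a) init = f^[k] init := by
  intro k
  induction k with
  | zero => intro init; simp
  | succ n ih =>
      intro init
      rw [List.range_succ, List.foldl_append, ih, Function.iterate_succ_apply']
      simp

theorem gcB_iter_append (students : List String) (g : Nat) :
    ∀ (l1 l2 : List (List String × Nat)),
      (gcB_step students)^[g] (l1 ++ l2) = (gcB_step students)^[g] l1 ++ (gcB_step students)^[g] l2 := by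
  induction g with
  | zero => intro l1 l2; simp
  | succ n ih =>
      intro l1 l2
      rw [Function.iterate_succ_apply, Function.iterate_succ_apply, Function.iterate_succ_apply]
      rw [gcB_step_eq_flatMap, List.flatMap_append, ← gcB_step_eq_flatMap, ← gcB_step_eq_flatMap, ih]

theorem range'_map_getD (students : List String) :
    ∀ (k s : Nat), students.length - s = k →
      (List.range' s k).map (fun j => students.getD j "") = students.drop s := by
  intro k
  induction k with
  | zero =>
      intro s hs
      have : students.length ≤ s := by omega
      simp [List.drop_eq_nil_of_le this]
  | succ n ih =>
      intro s hs
      have hlt : s < students.length := by omega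
      rw [List.range'_succ, List.map_cons, ih (s + 1) (by omega)]
      rw [List.drop_eq_getElem_cons hlt]
      simp [List.getD, List.getElem?_eq_getElem hlt]

theorem gcA_loop_drop (students : List String) (g : Int) :
    ∀ (k s : Nat), students.length - s = k →
      gcA_loop (students.drop s) g =
        ((List.range' s k).map
          (fun j => (group_combinations (students.drop (j + 1)) (g - 1)).map
            (fun t => students.getD j "" :: t))).flatten := by
  intro k
  induction k with
  | zero =>
      intro s hs
      have : students.length ≤ s := by omega
      simp [List.drop_eq_nil_of_le this, gcA_loop]
  | succ n ih =>
      intro s hs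
      have hlt : s < students.length := by omega
      rw [List.drop_eq_getElem_cons hlt, gcA_loop]
      rw [List.range'_succ, List.map_cons, List.flatten_cons, ih (s + 1) (by omega)]
      congr 1
      simp [List.getD, List.getElem?_eq_getElem hlt]

theorem gcB_iter_nil (students : List String) : ∀ (g : Nat), (gcB_step students)^[g] [] = [] := by
  intro g
  induction g with
  | zero => rfl
  | succ n ih => rw [Function.iterate_succ_apply, show gcB_step students [] = [] from rfl, ih]

theorem gcB_main (students : List String) :
    ∀ (g : Nat), 1 ≤ g → ∀ (c : List String) (s : Nat),
      ((gcB_step students)^[g] [(c, s)]).map Prod.fst =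
        (group_combinations (students.drop s) (g : Int)).map (fun t => c ++ t) := by
  intro g
  induction g with
  | zero => intro h; omega
  | succ n ih =>
      intro _ c s
      by_cases hn : n = 0
      · subst hn
        rw [Function.iterate_one, gcB_step_eq_flatMap]
        simp only [List.flatMap_cons, List.flatMap_nil, List.append_nil]
        unfold gcB_expand
        rw [show ((1 : Nat) : Int) = 1 by norm_num, group_combinations, if_pos rfl]
        rw [← range'_map_getD students (students.length - s) s rfl]
        simp [Function.comp_def]
      · have hn1 : 1 ≤ n := by omega
        rw [Function.iterate_succ_apply, gcB_step_eq_flatMap]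
        simp only [List.flatMap_cons, List.flatMap_nil, List.append_nil]
        unfold gcB_expand
        -- iterate over the mapped list: distribute with gcB_iter_append
        have hdist : ∀ (js : List Nat),
            ((gcB_step students)^[n] (js.map (fun j => (c ++ [students.getD j ""], j + 1)))).map Prod.fst
              = (js.map (fun j =>
                  (group_combinations (students.drop (j + 1)) (n : Int)).map
                    (fun t => c ++ (students.getD j "" :: t)))).flatten := by
          intro js
          induction js with
          | nil => simp [gcB_iter_nil]
          | cons j js ihj =>
              rw [List.map_cons, show ((c ++ [students.getD j ""], j + 1) :: js.map (fun j => (c ++ [students.getD j ""], j + 1))) = [(c ++ [students.getD j ""], j + 1)] ++ js.map (fun j => (c ++ [students.getD j ""], j + 1)) from rfl]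
              rw [gcB_iter_append, List.map_append, ihj, ih hn1]
              rw [List.map_cons, List.flatten_cons]
              congr 1
              simp [List.append_assoc]
        rw [hdist]
        have hne : ((n : Int) + 1) ≠ 1 := by omega
        rw [show ((n + 1 : Nat) : Int) = (n : Int) + 1 by push_cast; ring]
        rw [group_combinations, if_neg hne]
        rw [gcA_loop_drop students ((n : Int) + 1) (students.length - s) s rfl]
        rw [show ((n : Int) + 1 - 1) = (n : Int) by ring]
        rw [List.map_flatten]
        congr 1
        simp [List.map_map, Function.comp_def]

theorem gcA_big : ∀ (students : List String) (g : Int), (students.length : Int) < g →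
    group_combinations students g = [] ∧ gcA_loop students g = [] := by
  intro students
  induction students with
  | nil =>
      intro g hg
      by_cases h1 : g = 1
      · exact ⟨by rw [group_combinations, if_pos h1]; rfl, by simp [gcA_loop]⟩
      · exact ⟨by rw [group_combinations, if_neg h1]; simp [gcA_loop], by simp [gcA_loop]⟩
  | cons x xs ih =>
      intro g hg
      have hlen : (xs.length : Int) < g - 1 := by
        simp only [List.length_cons] at hg; push_cast at hg ⊢; omega
      have hlen2 : (xs.length : Int) < g := by omega
      have h1 : g ≠ 1 := by
        intro h; rw [h] at hg; simp at hg; omega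
      have hloop : gcA_loop (x :: xs) g = [] := by
        rw [gcA_loop, (ih (g - 1) hlen).1, (ih g hlen2).2]
        simp
      exact ⟨by rw [group_combinations, if_neg h1]; exact hloop, hloop⟩

theorem gcA_nonpos (students : List String) : ∀ (g : Int), g < 1 →
    group_combinations students g = [] ∧ gcA_loop students g = [] := by
  induction students with
  | nil =>
      intro g hg
      constructor
      · rw [group_combinations, if_neg (by omega)]; simp [gcA_loop]
      · simp [gcA_loop]
  | cons x xs ih =>
      intro g hg
      have hloop : gcA_loop (x :: xs) g = [] := by
        rw [gcA_loop, (ih (g - 1) (by omega)).1, (ih g hg).2]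
        simp
      exact ⟨by rw [group_combinations, if_neg (by omega)]; exact hloop, hloop⟩

-- ===== VERDICT (by name: the statement is the Claim_ definition above) =====
theorem group_combinations_spec : Claim_equal_group_combinations := by
  intro students group _
  unfold Spec_group_combinations group_combinations_alt
  by_cases h : group < 1 ∨ (students.length : Int) < group
  · rw [if_pos h]
    rcases h with h | h
    · exact (gcA_nonpos students group h).1
    · exact (gcA_big students group h).1
  · rw [if_neg h]
    push Not at h
    have hg1 : 1 ≤ group.toNat := by omega
    have hgi : (group.toNat : Int) = group := Int.toNat_of_nonneg (by omega)
    have hstep : (fun (level : List (List String × Nat)) (_ : Nat) =>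
        level.foldl (fun nxt p =>
          nxt ++ (List.range' p.2 (students.length - p.2)).map
            (fun j => (p.1 ++ [students.getD j ""], j + 1))) [])
        = fun level _ => gcB_step students level := by
      funext level _
      rfl
    rw [hstep, foldl_const_range (gcB_step students) group.toNat [([], 0)]]
    rw [gcB_main students group.toNat hg1 [] 0]
    simp [hgi]
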